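-- pv_equiv track=rewrite | github.com/xSomoy/Study | HackerRank/Certification/ProblemSolvingBasic/usernameChanges.py | possibleChanges
-- ===== SOURCE A (Python) =====
-- def possibleChanges(usernames):
--     # Write your code here
--
--     ans=[]
--     for i in usernames:
--         for j in range(0,len(i)-1):
--             if(i[j]>i[j+1]):
--                 ans.append("YES")
--                 break
--         else:
--             ans.append("NO")
--     return ans
-- ===== SOURCE B (Python) =====
-- def possibleChanges(usernames):
--     return ["NO" if list(u) == sorted(u) else "YES" for u in usernames]
-- ===== Notes on version B (the rewrite author's own statement) =====
-- stated objective: idiomatic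
-- what changed: Replaces the indexed inner loop with break/else that scans for a descending adjacent pair by a per-string sort-and-compare (list(u) == sorted(u)) inside a comprehension.
import Mathlib
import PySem

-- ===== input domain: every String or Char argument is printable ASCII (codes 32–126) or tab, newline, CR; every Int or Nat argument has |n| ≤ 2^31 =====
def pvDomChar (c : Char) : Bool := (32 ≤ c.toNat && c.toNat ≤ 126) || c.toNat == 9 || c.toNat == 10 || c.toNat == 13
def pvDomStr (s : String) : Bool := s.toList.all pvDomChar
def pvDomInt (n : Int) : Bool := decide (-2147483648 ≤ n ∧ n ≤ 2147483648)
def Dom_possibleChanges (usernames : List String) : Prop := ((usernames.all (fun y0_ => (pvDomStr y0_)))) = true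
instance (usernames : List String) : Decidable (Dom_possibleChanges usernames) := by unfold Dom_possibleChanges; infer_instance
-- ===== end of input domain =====

-- B replaces A's indexed scan for a descending adjacent pair by a per-string sort-and-compare (idiomatic; not faster).

-- ===== PORT A =====
-- the inner 'for j in range(0, len(i)-1): if i[j] > i[j+1]: append "YES"; break / else: append "NO"'
-- as the obvious structural recursion over the same adjacent pairs
def pvScanA : List Char → String
  | a :: b :: t => if a > b then "YES" else pvScanA (b :: t)
  | _ => "NO"

def possibleChanges (usernames : List String) : List String :=
  usernames.foldl (fun ans i => ans ++ [pvScanA i.toList]) []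

-- ===== PORT B =====
def possibleChanges_alt (usernames : List String) : List String :=
  usernames.map (fun u =>
    if u.toList = PySem.List.sorted u.toList (fun x => x) false then "NO" else "YES")

-- ===== PRECONDITION & SPEC =====
def Spec_possibleChanges (usernames : List String) (out : List String) : Prop := out = possibleChanges_alt usernames
instance (usernames : List String) (out : List String) : Decidable (Spec_possibleChanges usernames out) := by unfold Spec_possibleChanges; infer_instance

-- ===== CLAIM (what is proved, stated in full; the proofs are below) =====
def Claim_equal_possibleChanges : Prop := ∀ (usernames : List String), Dom_possibleChanges usernames → Spec_possibleChanges usernames (possibleChanges usernames)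

-- ===== LEMMAS AND PROOFS =====

theorem pvScanA_no (l : List Char) (h : l.IsChain (· ≤ ·)) : pvScanA l = "NO" := by
  induction l with
  | nil => simp [pvScanA]
  | cons a t ih =>
    cases t with
    | nil => simp [pvScanA]
    | cons b t' =>
      rcases List.isChain_cons_cons.mp h with ⟨hab, ht⟩
      simp [pvScanA, not_lt.mpr hab, ih ht]

theorem pvScanA_yes (l : List Char) (h : ¬ l.IsChain (· ≤ ·)) : pvScanA l = "YES" := by
  induction l with
  | nil => exact absurd List.isChain_nil h
  | cons a t ih =>
    cases t with
    | nil => exact absurd (List.isChain_singleton a) h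
    | cons b t' =>
      by_cases hab : a > b
      · simp [pvScanA, hab]
      · have : ¬ (b :: t').IsChain (· ≤ ·) := fun hc =>
          h (List.isChain_cons_cons.mpr ⟨not_lt.mp hab, hc⟩)
        simp [pvScanA, hab, ih this]

theorem sorted_eq_iff_chain (l : List Char) :
    l = PySem.List.sorted l (fun x => x) false ↔ l.IsChain (· ≤ ·) := by
  constructor
  · intro h
    have hp := PySem.List.sorted_pairwise (xs := l) (key := fun x => x)
    rw [← h] at hp
    have hp' : l.Pairwise (· ≤ ·) := hp
    exact List.isChain_iff_pairwise.mpr hp'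
  · intro h
    have hp : l.Pairwise (· ≤ ·) := List.isChain_iff_pairwise.mp h
    exact (PySem.List.sorted_eq_self_of_pairwise l (fun x => x) hp).symm

theorem foldl_append_map (usernames : List String) (acc : List String) :
    usernames.foldl (fun ans i => ans ++ [pvScanA i.toList]) acc
      = acc ++ usernames.map (fun i => pvScanA i.toList) := by
  induction usernames generalizing acc with
  | nil => simp
  | cons u t ih => simp [List.foldl, ih]

-- ===== VERDICT (by name: the statement is the Claim_ definition above) =====
theorem possibleChanges_spec : Claim_equal_possibleChanges := by
  intro usernames _
  unfold Spec_possibleChanges possibleChanges possibleChanges_alt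
  rw [foldl_append_map, List.nil_append]
  apply List.map_congr_left
  intro u _
  split
  · exact pvScanA_no _ ((sorted_eq_iff_chain _).mp (by assumption))
  · exact pvScanA_yes _ (fun hc => (by assumption : ¬ _) ((sorted_eq_iff_chain _).mpr hc))
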